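-- pv_equiv track=rewrite | github.com/posl/comment_recommendation | script/split_gen/5_time/en/134_D/5.py | check
-- ===== SOURCE A (Python) =====
-- def check(a):
--     n = len(a)
--     for i in range(1,n+1):
--         s = 0
--         for j in range(1,n+1):
--             if j%i == 0:
--                 s += a[j-1]
--         if s%2 != a[i-1]:
--             return False
--     return True
-- ===== SOURCE B (Python) =====
-- def check(a):
--     # B: build the whole table of multiple-sums first; A instead rescans
--     # all j for each i and early-returns. Then compare the parity table against a by plain list equality.
--     n = len(a)
--     s = [0] * (n + 1)
--     for i in range(1, n + 1):
--         for j in range(i, n + 1, i):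
--             s[i] += a[j - 1]
--     return [x % 2 for x in s[1:]] == a
-- ===== Notes on version B (the rewrite author's own statement) =====
-- stated objective: alternative
-- what changed: A scans all j in 1..n for every i testing j % i == 0 and early-returns on the first failing i; B instead builds a sums table in one sieve-style pass over the multiples j = i, 2i, ... and then checks the whole answer at once by comparing the parity table [s[i] % 2] against a with list equality (on random inputs A's early return makes it faster, so no speed is claimed).
import Mathlib
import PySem

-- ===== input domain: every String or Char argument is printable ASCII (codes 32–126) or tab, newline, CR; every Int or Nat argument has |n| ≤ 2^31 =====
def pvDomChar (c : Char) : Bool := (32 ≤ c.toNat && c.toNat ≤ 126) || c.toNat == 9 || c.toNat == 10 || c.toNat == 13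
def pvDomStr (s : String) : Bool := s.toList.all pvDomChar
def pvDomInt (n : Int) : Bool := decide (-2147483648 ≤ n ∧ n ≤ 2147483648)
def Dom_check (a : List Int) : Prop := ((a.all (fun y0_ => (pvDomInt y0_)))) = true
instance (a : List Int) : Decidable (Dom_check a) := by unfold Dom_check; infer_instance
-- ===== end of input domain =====

-- B replaces A's all-i scan over all j (testing j % i == 0, early return) by a staged
-- sieve: build the table of multiple-sums in place, then compare the parity table to a
-- by list equality; an alternative algorithm, return values identical.


-- ===== PORT A =====
-- for i in range(1,n+1): s = fold over j in range(1,n+1) adding a[j-1] when j%i==0;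
-- return False on the first i with s%2 != a[i-1]  (early return = List.all)
def check (a : List Int) : Bool :=
  let n : Int := a.length
  (PySem.List.pyRange 1 (n+1) 1).all (fun i =>
    let s : Int := (PySem.List.pyRange 1 (n+1) 1).foldl
      (fun s j => if PySem.Int.mod j i = 0 then s + PySem.List.pyGetD a (j-1) 0 else s) 0
    decide (PySem.Int.mod s 2 = PySem.List.pyGetD a (i-1) 0))

-- ===== PORT B =====
-- s = [0]*(n+1); for i: for j in range(i,n+1,i): s[i] += a[j-1];
-- return [x % 2 for x in s[1:]] == a
def check_alt (a : List Int) : Bool :=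
  let n : Int := a.length
  let s : List Int := (PySem.List.pyRange 1 (n+1) 1).foldl
    (fun s i => (PySem.List.pyRange i (n+1) i).foldl
      (fun t j => PySem.List.pySetD t i
        (PySem.List.pyGetD t i 0 + PySem.List.pyGetD a (j-1) 0)) s)
    (List.replicate (n+1).toNat 0)
  decide ((PySem.List.slice s (some 1) none).map (fun x => PySem.Int.mod x 2) = a)

-- ===== PRECONDITION & SPEC =====
def Spec_check (a : List Int) (out : Bool) : Prop := out = check_alt a
instance (a : List Int) (out : Bool) : Decidable (Spec_check a out) := by unfold Spec_check; infer_instance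

-- ===== CLAIM (what is proved, stated in full; the proofs are below) =====
def Claim_equal_check : Prop := ∀ (a : List Int), Dom_check a → Spec_check a (check a)

-- ===== LEMMAS AND PROOFS =====

-- pySetD at a nonnegative in-range Int index is List.set
theorem pySetD_eq_set (xs : List Int) (i : Int) (v : Int)
    (h0 : 0 ≤ i) (h : i.toNat < xs.length) :
    PySem.List.pySetD xs i v = xs.set i.toNat v := by
  obtain ⟨k, rfl⟩ : ∃ k : Nat, i = (k : Int) := ⟨i.toNat, (Int.toNat_of_nonneg h0).symm⟩
  simp only [Int.toNat_natCast] at h ⊢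
  simp [PySem.List.pySetD, PySem.List.pySet?, PySem.List.pyIdx?, h]

-- pyGetD at a nonnegative in-range Int index is List.getD at toNat
theorem pyGetD_eq_getD (xs : List Int) (i : Int) (d : Int) (h0 : 0 ≤ i) :
    PySem.List.pyGetD xs i d = xs.getD i.toNat d := by
  obtain ⟨k, rfl⟩ : ∃ k : Nat, i = (k : Int) := ⟨i.toNat, (Int.toNat_of_nonneg h0).symm⟩
  simp

-- B's inner loop collapses to one set: repeatedly adding to slot i sums the list
theorem inner_collapse (f : Int → Int) :
    ∀ (l : List Int) (t : List Int) (i : Int), 0 ≤ i → i.toNat < t.length →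
      l.foldl (fun t j => PySem.List.pySetD t i (PySem.List.pyGetD t i 0 + f j)) t
        = t.set i.toNat (t.getD i.toNat 0 + (l.map f).sum) := by
  intro l
  induction l with
  | nil =>
    intro t i h0 h
    simp only [List.foldl_nil, List.map_nil, List.sum_nil, add_zero,
      List.getD_eq_getElem t 0 h]
    exact (List.set_getElem_self h).symm
  | cons x xs ih =>
    intro t i h0 h
    simp only [List.foldl_cons, List.map_cons, List.sum_cons]
    rw [pyGetD_eq_getD t i 0 h0, pySetD_eq_set t i _ h0 h,
        ih (t.set i.toNat (t.getD i.toNat 0 + f x)) i h0 (by simpa using h)]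
    simp only [List.getD_eq_getElem?_getD, List.getElem?_set_self h, Option.getD_some,
      List.set_set]
    congr 1
    ring

-- the outer fold leaves a slot untouched when its index occurs in none of the rounds
theorem outer_untouched (f : Int → Int) (b : Int) :
    ∀ (L : List Int) (t : List Int) (m : Nat),
      (∀ i ∈ L, 0 ≤ i ∧ i.toNat < t.length ∧ i.toNat ≠ m) →
      ((L.foldl (fun s i => (PySem.List.pyRange i b i).foldl
          (fun t j => PySem.List.pySetD t i (PySem.List.pyGetD t i 0 + f j)) s) t).getD m 0)
        = t.getD m 0 := by
  intro L
  induction L with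
  | nil => intro t m _; rfl
  | cons i L ih =>
    intro t m hmem
    obtain ⟨h0, hlt, hne⟩ := hmem i (List.mem_cons_self)
    have hstep := inner_collapse f (PySem.List.pyRange i b i) t i h0 hlt
    simp only [List.foldl_cons, hstep]
    have h1 : ∀ i' ∈ L, 0 ≤ i' ∧
        i'.toNat < (t.set i.toNat (t.getD i.toNat 0 +
          ((PySem.List.pyRange i b i).map f).sum)).length ∧ i'.toNat ≠ m := by
      intro i' hi'
      obtain ⟨h0', hlt', hne'⟩ := hmem i' (List.mem_cons_of_mem i hi')
      exact ⟨h0', by simpa using hlt', hne'⟩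
    rw [ih _ _ h1]
    simp only [List.getD_eq_getElem?_getD]
    rw [List.getElem?_set_ne hne]

-- the outer fold writes the multiple-sum of round i into slot i
theorem outer_slot (f : Int → Int) (b : Int) :
    ∀ (L : List Int) (t : List Int) (i : Int), i ∈ L → L.Nodup →
      (∀ i' ∈ L, 0 ≤ i' ∧ i'.toNat < t.length) →
      ((L.foldl (fun s i => (PySem.List.pyRange i b i).foldl
          (fun t j => PySem.List.pySetD t i (PySem.List.pyGetD t i 0 + f j)) s) t).getD i.toNat 0)
        = t.getD i.toNat 0 + ((PySem.List.pyRange i b i).map f).sum := by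
  intro L
  induction L with
  | nil => intro t i hi; simp at hi
  | cons i' L ih =>
    intro t i hi hnd hall
    obtain ⟨h0', hlt'⟩ := hall i' (List.mem_cons_self)
    have hstep := inner_collapse f (PySem.List.pyRange i' b i') t i' h0' hlt'
    simp only [List.foldl_cons, hstep]
    rcases List.mem_cons.1 hi with rfl | hiL
    · have h1 : ∀ i'' ∈ L, 0 ≤ i'' ∧
          i''.toNat < (t.set i.toNat (t.getD i.toNat 0 +
            ((PySem.List.pyRange i b i).map f).sum)).length ∧ i''.toNat ≠ i.toNat := by
        intro i'' hi''
        obtain ⟨h0'', hlt''⟩ := hall i'' (List.mem_cons_of_mem i hi'')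
        refine ⟨h0'', by simpa using hlt'', ?_⟩
        have hne : i ≠ i'' := fun h => (List.nodup_cons.1 hnd).1 (h ▸ hi'')
        omega
      rw [outer_untouched f b L _ i.toNat h1]
      rw [List.getD_eq_getElem?_getD, List.getElem?_set_self hlt', Option.getD_some]
    · have hne : i' ≠ i := fun h => (List.nodup_cons.1 hnd).1 (h ▸ hiL)
      have h0 : 0 ≤ i := (hall i (List.mem_cons_of_mem i' hiL)).1
      have h1 : ∀ i'' ∈ L, 0 ≤ i'' ∧
          i''.toNat < (t.set i'.toNat (t.getD i'.toNat 0 +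
            ((PySem.List.pyRange i' b i').map f).sum)).length := by
        intro i'' hi''
        obtain ⟨h0'', hlt''⟩ := hall i'' (List.mem_cons_of_mem i' hi'')
        exact ⟨h0'', by simpa using hlt''⟩
      rw [ih _ i hiL (List.nodup_cons.1 hnd).2 h1]
      congr 1
      simp only [List.getD_eq_getElem?_getD]
      rw [List.getElem?_set_ne (by omega)]

-- the outer fold preserves the table length
theorem outer_length (f : Int → Int) (b : Int) :
    ∀ (L : List Int) (t : List Int),
      (L.foldl (fun s i => (PySem.List.pyRange i b i).foldl
          (fun t j => PySem.List.pySetD t i (PySem.List.pyGetD t i 0 + f j)) s) t).length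
        = t.length := by
  have inner : ∀ (l : List Int) (t : List Int) (i : Int),
      (l.foldl (fun t j => PySem.List.pySetD t i (PySem.List.pyGetD t i 0 + f j)) t).length
        = t.length := by
    intro l
    induction l with
    | nil => intro t i; rfl
    | cons x xs ih => intro t i; rw [List.foldl_cons, ih, PySem.List.length_pySetD]
  intro L
  induction L with
  | nil => intro t; rfl
  | cons i L ih => intro t; rw [List.foldl_cons, ih, inner]

-- ===== A-side lemmas: the guarded scan over 1..n equals the sum over multiples =====

-- fold with a guarded add = sum over the filtered list
theorem foldl_ite_add_eq_sum_filter (p : Int → Bool) (g : Int → Int) :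
    ∀ (l : List Int) (init : Int),
      l.foldl (fun s j => if p j = true then s + g j else s) init
        = init + ((l.filter p).map g).sum := by
  intro l
  induction l with
  | nil => simp
  | cons x xs ih =>
    intro init
    by_cases hx : p x = true
    · simp [List.foldl_cons, hx, ih]; ring
    · simp [List.foldl_cons, hx, ih]

-- two strictly increasing integer lists with the same members are equal
theorem eq_of_pairwise_lt_of_mem_iff {l₁ l₂ : List Int}
    (h₁ : List.Pairwise (· < ·) l₁) (h₂ : List.Pairwise (· < ·) l₂)
    (hm : ∀ x, x ∈ l₁ ↔ x ∈ l₂) : l₁ = l₂ := by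
  have p : l₁.Perm l₂ := (List.perm_ext_iff_of_nodup (h₁.imp ne_of_lt) (h₂.imp ne_of_lt)).2 hm
  exact List.Perm.eq_of_pairwise (fun a b _ _ hab hba => absurd hba (asymm hab)) h₁ h₂ p

theorem pairwise_lt_pyRange_step (i b : Int) (hi : 0 < i) :
    List.Pairwise (· < ·) (PySem.List.pyRange i b i) := by
  rw [PySem.List.pyRange_of_pos i b hi]
  exact (List.pairwise_lt_range).map _ (fun {k k'} h => by nlinarith)

-- the multiples of i among 1..n are exactly range(i, n+1, i)
theorem filter_mod_eq_pyRange (i n : Int) (hi : 1 ≤ i) :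
    (PySem.List.pyRange 1 (n+1) 1).filter (fun j => decide (PySem.Int.mod j i = 0))
      = PySem.List.pyRange i (n+1) i := by
  apply eq_of_pairwise_lt_of_mem_iff
  · exact List.Pairwise.filter _ (PySem.List.pairwise_lt_pyRange_one 1 (n+1))
  · exact pairwise_lt_pyRange_step i (n+1) (by omega)
  · intro x
    rw [List.mem_filter, PySem.List.mem_pyRange_one,
        PySem.List.mem_pyRange_iff_of_pos (by omega : (0:Int) < i)]
    simp only [decide_eq_true_eq, PySem.Int.mod_eq_zero_iff_dvd]
    constructor
    · rintro ⟨⟨h1, h2⟩, hdvd⟩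
      exact ⟨Int.le_of_dvd (by omega) hdvd, h2, dvd_sub hdvd dvd_rfl⟩
    · rintro ⟨hle, hlt, hdvd⟩
      have hx : i ∣ x := by have := dvd_add hdvd (dvd_refl i); simpa using this
      exact ⟨⟨by omega, hlt⟩, hx⟩

-- ===== main equality =====

theorem check_spec' (a : List Int) : check a = check_alt a := by
  simp only [check, check_alt]
  set n : Int := (a.length : Int) with hn
  set f : Int → Int := fun j => PySem.List.pyGetD a (j-1) 0 with hf
  set s : List Int := (PySem.List.pyRange 1 (n+1) 1).foldl
    (fun s i => (PySem.List.pyRange i (n+1) i).foldl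
      (fun t j => PySem.List.pySetD t i
        (PySem.List.pyGetD t i 0 + PySem.List.pyGetD a (j-1) 0)) s)
    (List.replicate (n+1).toNat 0) with hs
  -- length of the table
  have hslen : s.length = a.length + 1 := by
    rw [hs, outer_length f (n+1)]
    simp [hn]
  -- the table's slots hold the multiple-sums
  have hslot : ∀ i : Int, 1 ≤ i → i < n + 1 →
      s.getD i.toNat 0 = ((PySem.List.pyRange i (n+1) i).map f).sum := by
    intro i h1 h2
    rw [hs, outer_slot f (n+1) _ _ i
      (PySem.List.mem_pyRange_one.2 ⟨h1, h2⟩)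
      (PySem.List.nodup_pyRange_one 1 (n+1))
      (fun i' hi' => by
        have := PySem.List.mem_pyRange_one.1 hi'
        constructor
        · omega
        · simp only [List.length_replicate]; omega)]
    rw [List.getD_eq_getElem?_getD, List.getElem?_replicate_of_lt (by simp [hn]; omega)]
    simp
  -- the parity list on B's side
  rw [PySem.List.slice_from s (by omega : (0:Int) ≤ 1)]
  -- A's per-round scan is the multiple-sum
  have hA : ∀ i ∈ PySem.List.pyRange 1 (n+1) 1,
      ((PySem.List.pyRange 1 (n+1) 1).foldl
        (fun s j => if PySem.Int.mod j i = 0 then s + PySem.List.pyGetD a (j-1) 0 else s) 0)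
        = ((PySem.List.pyRange i (n+1) i).map f).sum := by
    intro i hi
    have hi1 : 1 ≤ i := (PySem.List.mem_pyRange_one.1 hi).1
    have := foldl_ite_add_eq_sum_filter (fun j => decide (PySem.Int.mod j i = 0)) f
      (PySem.List.pyRange 1 (n+1) 1) 0
    simp only [decide_eq_true_eq, hf] at this
    rw [this, filter_mod_eq_pyRange i n hi1, zero_add]
  rw [Bool.eq_iff_iff]
  simp only [List.all_eq_true, decide_eq_true_eq]
  constructor
  · -- A's property implies B's list equality
    intro h
    apply List.ext_getElem
    · simp [hslen]
    · intro k hk1 hk2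
      have hk : k < a.length := hk2
      have hmem : ((k:Int)+1) ∈ PySem.List.pyRange 1 (n+1) 1 :=
        PySem.List.mem_pyRange_one.2 ⟨by omega, by omega⟩
      have hval := h _ hmem
      rw [hA _ hmem] at hval
      have hslotk := hslot ((k:Int)+1) (by omega) (by omega)
      rw [show ((k:Int)+1).toNat = 1 + k by omega] at hslotk
      simp only [List.getElem_map, List.getElem_drop, Int.toNat_one]
      rw [← List.getD_eq_getElem s 0 (by omega : 1 + k < s.length), hslotk, hval,
          show ((k:Int)+1-1) = (k:Int) by ring, PySem.List.pyGetD_natCast,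
          List.getD_eq_getElem a 0 hk]
  · -- B's list equality implies A's property
    intro h i hi
    simp only [Int.toNat_one] at h
    obtain ⟨hi1, hi2⟩ := PySem.List.mem_pyRange_one.1 hi
    rw [hA _ hi]
    have hk : (i-1).toNat < a.length := by omega
    have hcong : (List.map (fun x => PySem.Int.mod x 2) (List.drop 1 s))[(i-1).toNat]?
        = a[(i-1).toNat]? := by rw [h]
    rw [List.getElem?_map, List.getElem?_drop,
        List.getElem?_eq_getElem (by omega : 1 + (i-1).toNat < s.length),
        List.getElem?_eq_getElem hk, Option.map_some] at hcong
    have hval := Option.some.inj hcong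
    have hslotk := hslot i hi1 hi2
    rw [show i.toNat = 1 + (i-1).toNat by omega,
        List.getD_eq_getElem s 0 (by omega : 1 + (i-1).toNat < s.length)] at hslotk
    rw [hslotk] at hval
    rw [pyGetD_eq_getD a (i-1) 0 (by omega), List.getD_eq_getElem a 0 hk]
    exact hval

-- ===== VERDICT (by name: the statement is the Claim_ definition above) =====
theorem check_spec : Claim_equal_check := by
  intro a _
  unfold Spec_check
  exact check_spec' a
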